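-- pv_equiv track=rewrite | github.com/MarouaneBenbetka/Dependence-Driven-Quantum-Mapping | src/graph_tools.py | generate_2d_grid
-- ===== SOURCE A (Python) =====
-- def generate_2d_grid(num_rows = 4, num_cols = 4):
--     num_qubits = num_rows * num_cols
--     graph = [[] for _ in range(num_qubits)]
--
--     for i in range(num_rows):
--         for j in range(num_cols):
--             index = i * num_cols + j
--             if j > 0:
--                 graph[index].append(index - 1)
--             if j + 1 < num_cols:
--                 graph[index].append(index + 1)
--             if i > 0:
--                 graph[index].append(index - num_cols)
--             if i + 1 < num_rows:
--                 graph[index].append(index + num_cols)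
--
--     return graph
-- ===== SOURCE B (Python) =====
-- def generate_2d_grid(num_rows=4, num_cols=4):
--     # Edge-centric construction: touch each grid edge once, writing both endpoints.
--     graph = [[] for _ in range(num_rows * num_cols)]
--     # all horizontal edges first (keeps each node's order [left, right, up, down])
--     for i in range(num_rows):
--         for j in range(num_cols - 1):
--             a = i * num_cols + j
--             b = a + 1
--             graph[a].append(b)
--             graph[b].append(a)
--     # then all vertical edges
--     for i in range(num_rows - 1):
--         for j in range(num_cols):
--             a = i * num_cols + j
--             b = a + num_cols
--             graph[a].append(b)
--             graph[b].append(a)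
--     return graph
-- ===== Notes on version B (the rewrite author's own statement) =====
-- stated objective: alternative
-- what changed: Replaces the node-centric scan that probes four directions per cell with an edge-centric construction: two passes that enumerate each horizontal and then each vertical edge once and append both endpoints.
import Mathlib
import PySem

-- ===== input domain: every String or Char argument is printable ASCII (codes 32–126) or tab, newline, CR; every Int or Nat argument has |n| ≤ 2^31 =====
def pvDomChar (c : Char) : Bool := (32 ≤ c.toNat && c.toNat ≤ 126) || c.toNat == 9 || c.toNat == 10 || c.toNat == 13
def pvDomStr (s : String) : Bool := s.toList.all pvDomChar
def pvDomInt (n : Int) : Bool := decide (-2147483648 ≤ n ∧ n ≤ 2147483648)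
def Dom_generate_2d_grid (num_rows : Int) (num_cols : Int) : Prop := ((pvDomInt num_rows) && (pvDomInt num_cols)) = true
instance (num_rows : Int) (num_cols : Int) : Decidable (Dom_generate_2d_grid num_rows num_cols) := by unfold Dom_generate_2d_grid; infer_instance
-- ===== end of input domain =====

-- B replaces A's node-centric four-direction probe with an edge-centric two-pass construction
-- (all horizontal edges, then all vertical edges, writing both endpoints of each edge once);
-- same O(rows*cols) cost, proved to return the identical adjacency lists.

-- graph[idx].append(v)  (idx is provably nonnegative at every executed append in both programs)
def pyAppendAt (g : List (List Int)) (idx : Int) (v : Int) : List (List Int) :=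
  g.modify idx.toNat (· ++ [v])

-- ===== PORT A =====
def generate_2d_grid (num_rows : Int) (num_cols : Int) : List (List Int) :=
  let num_qubits := num_rows * num_cols
  let graph : List (List Int) := List.replicate num_qubits.toNat []
  (PySem.List.pyRange 0 num_rows 1).foldl (fun graph i =>
    (PySem.List.pyRange 0 num_cols 1).foldl (fun graph j =>
      let index := i * num_cols + j
      let graph := if 0 < j then pyAppendAt graph index (index - 1) else graph
      let graph := if j + 1 < num_cols then pyAppendAt graph index (index + 1) else graph
      let graph := if 0 < i then pyAppendAt graph index (index - num_cols) else graph
      if i + 1 < num_rows then pyAppendAt graph index (index + num_cols) else graph) graph) graph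

-- ===== PORT B =====
def generate_2d_grid_alt (num_rows : Int) (num_cols : Int) : List (List Int) :=
  let graph0 : List (List Int) := List.replicate (num_rows * num_cols).toNat []
  -- all horizontal edges first
  let graph1 := (PySem.List.pyRange 0 num_rows 1).foldl (fun g i =>
    (PySem.List.pyRange 0 (num_cols - 1) 1).foldl (fun g j =>
      let a := i * num_cols + j
      let b := a + 1
      pyAppendAt (pyAppendAt g a b) b a) g) graph0
  -- then all vertical edges
  (PySem.List.pyRange 0 (num_rows - 1) 1).foldl (fun g i =>
    (PySem.List.pyRange 0 num_cols 1).foldl (fun g j =>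
      let a := i * num_cols + j
      let b := a + num_cols
      pyAppendAt (pyAppendAt g a b) b a) g) graph1

-- ===== PRECONDITION & SPEC =====
def Spec_generate_2d_grid (num_rows : Int) (num_cols : Int) (out : List (List Int)) : Prop := out = generate_2d_grid_alt num_rows num_cols
instance (num_rows : Int) (num_cols : Int) (out : List (List Int)) : Decidable (Spec_generate_2d_grid num_rows num_cols out) := by unfold Spec_generate_2d_grid; infer_instance

-- ===== CLAIM (what is proved, stated in full; the proofs are below) =====
def Claim_equal_generate_2d_grid : Prop := ∀ (num_rows : Int) (num_cols : Int), Dom_generate_2d_grid num_rows num_cols → Spec_generate_2d_grid num_rows num_cols (generate_2d_grid num_rows num_cols)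

-- ===== LEMMAS AND PROOFS =====

-- Both programs are sequences of "append v to graph[idx]" operations on an initial list of
-- empty cells; we flatten each into its operation list and compare, per target cell, the
-- subsequence of values appended there.

def pvOp (g : List (List Int)) (p : Nat × Int) : List (List Int) := g.modify p.1 (· ++ [p.2])

def applyOps (g : List (List Int)) (ops : List (Nat × Int)) : List (List Int) := ops.foldl pvOp g

lemma applyOps_append (g : List (List Int)) (l₁ l₂ : List (Nat × Int)) :
    applyOps g (l₁ ++ l₂) = applyOps (applyOps g l₁) l₂ :=
  List.foldl_append

lemma getElem?_applyOps (g : List (List Int)) (ops : List (Nat × Int)) (k : Nat) :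
    (applyOps g ops)[k]? = (g[k]?).map (· ++ (ops.filter (fun p => p.1 == k)).map Prod.snd) := by
  induction ops generalizing g with
  | nil => cases h : g[k]? <;> simp [applyOps, h]
  | cons p t ih =>
    rw [show applyOps g (p :: t) = applyOps (pvOp g p) t from rfl, ih]
    rw [show pvOp g p = g.modify p.1 (· ++ [p.2]) from rfl, List.getElem?_modify]
    cases h : g[k]? with
    | none => simp
    | some c =>
      by_cases hp : p.1 = k <;> simp [hp]

lemma applyOps_ext (g : List (List Int)) (ops₁ ops₂ : List (Nat × Int))
    (h : ∀ k : Nat, k < g.length →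
      (ops₁.filter (fun p => p.1 == k)).map Prod.snd = (ops₂.filter (fun p => p.1 == k)).map Prod.snd) :
    applyOps g ops₁ = applyOps g ops₂ := by
  apply List.ext_getElem?
  intro k
  rw [getElem?_applyOps, getElem?_applyOps]
  by_cases hk : k < g.length
  · rw [h k hk]
  · rw [List.getElem?_eq_none (by omega)]
    rfl

lemma foldl_eq_applyOps (l : List Int) (F : List (List Int) → Int → List (List Int))
    (f : Int → List (Nat × Int)) (h : ∀ g x, F g x = applyOps g (f x)) (g : List (List Int)) :
    l.foldl F g = applyOps g (l.flatMap f) := by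
  induction l generalizing g with
  | nil => rfl
  | cons x t ih => rw [List.foldl_cons, ih, h, List.flatMap_cons, applyOps_append]

-- the operation lists of the two programs
def opsCellA (R C i j : Int) : List (Nat × Int) :=
  (if 0 < j then [((i*C+j).toNat, i*C+j - 1)] else []) ++
  (if j + 1 < C then [((i*C+j).toNat, i*C+j + 1)] else []) ++
  (if 0 < i then [((i*C+j).toNat, i*C+j - C)] else []) ++
  (if i + 1 < R then [((i*C+j).toNat, i*C+j + C)] else [])

def opsA (R C : Int) : List (Nat × Int) :=
  (PySem.List.pyRange 0 R 1).flatMap (fun i =>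
    (PySem.List.pyRange 0 C 1).flatMap (fun j => opsCellA R C i j))

def opsH (R C : Int) : List (Nat × Int) :=
  (PySem.List.pyRange 0 R 1).flatMap (fun i =>
    (PySem.List.pyRange 0 (C-1) 1).flatMap (fun j =>
      [((i*C+j).toNat, i*C+j + 1), ((i*C+j+1).toNat, i*C+j)]))

def opsV (R C : Int) : List (Nat × Int) :=
  (PySem.List.pyRange 0 (R-1) 1).flatMap (fun i =>
    (PySem.List.pyRange 0 C 1).flatMap (fun j =>
      [((i*C+j).toNat, i*C+j + C), ((i*C+j+C).toNat, i*C+j)]))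

lemma portA_eq (R C : Int) :
    generate_2d_grid R C = applyOps (List.replicate (R*C).toNat []) (opsA R C) := by
  rw [generate_2d_grid, opsA]
  refine foldl_eq_applyOps _ _ _ (fun g i => ?_) _
  refine foldl_eq_applyOps _ _ _ (fun g j => ?_) _
  simp only [opsCellA, applyOps, pyAppendAt]
  split_ifs <;> rfl

lemma portB_eq (R C : Int) :
    generate_2d_grid_alt R C = applyOps (List.replicate (R*C).toNat []) (opsH R C ++ opsV R C) := by
  have hH : (PySem.List.pyRange 0 R 1).foldl
      (fun g i => (PySem.List.pyRange 0 (C-1) 1).foldl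
        (fun g j =>
          let a := i * C + j
          let b := a + 1
          pyAppendAt (pyAppendAt g a b) b a) g)
      (List.replicate (R*C).toNat [])
      = applyOps (List.replicate (R*C).toNat [])
        ((PySem.List.pyRange 0 R 1).flatMap (fun i => (PySem.List.pyRange 0 (C-1) 1).flatMap
          (fun j => [((i*C+j).toNat, i*C+j + 1), ((i*C+j+1).toNat, i*C+j)]))) := by
    refine foldl_eq_applyOps _ _ _ (fun g i => ?_) _
    refine foldl_eq_applyOps _ _ _ (fun g j => ?_) _
    rfl
  have hV : ∀ s : List (List Int), (PySem.List.pyRange 0 (R-1) 1).foldl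
      (fun g i => (PySem.List.pyRange 0 C 1).foldl
        (fun g j =>
          let a := i * C + j
          let b := a + C
          pyAppendAt (pyAppendAt g a b) b a) g) s
      = applyOps s
        ((PySem.List.pyRange 0 (R-1) 1).flatMap (fun i => (PySem.List.pyRange 0 C 1).flatMap
          (fun j => [((i*C+j).toNat, i*C+j + C), ((i*C+j+C).toNat, i*C+j)]))) := by
    intro s
    refine foldl_eq_applyOps _ _ _ (fun g i => ?_) _
    refine foldl_eq_applyOps _ _ _ (fun g j => ?_) _
    rfl
  rw [generate_2d_grid_alt, opsH, opsV, applyOps_append, hV, hH]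

-- flatMap over a range of a function supported on at most two points
lemma flatMap_pyRange_two {α : Type} (n a b : Int) (hn : 0 ≤ n) (hab : a < b) (u v : List α) :
    (PySem.List.pyRange 0 n 1).flatMap
      (fun x => (if x = a then u else []) ++ (if x = b then v else []))
    = (if 0 ≤ a ∧ a < n then u else []) ++ (if 0 ≤ b ∧ b < n then v else []) := by
  obtain ⟨m, rfl⟩ : ∃ m : Nat, n = (m : Int) := ⟨n.toNat, (Int.toNat_of_nonneg hn).symm⟩
  induction m with
  | zero =>
    rw [PySem.List.pyRange_one_eq_nil (by omega)]
    simp only [List.flatMap_nil]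
    split_ifs with h1 h2 h2 <;> first | rfl | omega
  | succ m ih =>
    rw [show ((m+1 : Nat) : Int) = (m : Int) + 1 by push_cast; ring,
        PySem.List.pyRange_one_succ_right (by positivity), List.flatMap_append,
        ih (by positivity)]
    simp only [List.flatMap_cons, List.flatMap_nil, List.append_nil]
    split_ifs <;> first | rfl | omega | simp only [List.append_nil, List.nil_append]

lemma flatMap_pyRange_one {α : Type} (n a : Int) (hn : 0 ≤ n) (u : List α) :
    (PySem.List.pyRange 0 n 1).flatMap (fun x => if x = a then u else [])
    = if 0 ≤ a ∧ a < n then u else [] := by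
  obtain ⟨m, rfl⟩ : ∃ m : Nat, n = (m : Int) := ⟨n.toNat, (Int.toNat_of_nonneg hn).symm⟩
  induction m with
  | zero =>
    rw [PySem.List.pyRange_one_eq_nil (by omega)]
    simp only [List.flatMap_nil]
    split_ifs with h1 <;> first | rfl | omega
  | succ m ih =>
    rw [show ((m+1 : Nat) : Int) = (m : Int) + 1 by push_cast; ring,
        PySem.List.pyRange_one_succ_right (by positivity), List.flatMap_append,
        ih (by positivity)]
    simp only [List.flatMap_cons, List.flatMap_nil, List.append_nil]
    split_ifs <;> first | rfl | omega | simp only [List.append_nil]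

-- unique cell: i*C + j = q*C + r with 0 ≤ j,r < C forces i = q and j = r
lemma cellIff (C q r i j : Int) (hC : 0 < C) (hr0 : 0 ≤ r) (hrC : r < C)
    (hj0 : 0 ≤ j) (hjC : j < C) : i*C + j = q*C + r ↔ i = q ∧ j = r := by
  constructor
  · intro h
    have hd : (i - q) * C = r - j := by linarith [h, (by ring : (i - q) * C = i*C - q*C)]
    have hi : i = q := by
      rcases lt_trichotomy i q with hlt | heq | hgt
      · have : (i - q) * C ≤ (-1) * C :=
          mul_le_mul_of_nonneg_right (by omega) hC.le
        omega
      · exact heq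
      · have : (1 : Int) * C ≤ (i - q) * C :=
          mul_le_mul_of_nonneg_right (by omega) hC.le
        omega
    exact ⟨hi, by rw [hi] at h; omega⟩
  · rintro ⟨rfl, rfl⟩; rfl


-- filtering a two-element operation list / a guarded singleton at target cell k
lemma filter_pair_key (k : Nat) (a1 : Nat) (v1 : Int) (a2 : Nat) (v2 : Int) :
    List.filter (fun p => p.1 == k) [(a1, v1), (a2, v2)]
    = (if a1 = k then [(a1, v1)] else []) ++ (if a2 = k then [(a2, v2)] else []) := by
  by_cases h1 : a1 = k <;> by_cases h2 : a2 = k <;> simp [h1, h2]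

lemma filter_ite_key (k : Nat) (P : Prop) [Decidable P] (a : Nat) (v : Int) :
    List.filter (fun p => p.1 == k) (if P then [(a, v)] else [])
    = if P ∧ a = k then [(a, v)] else [] := by
  by_cases hP : P <;> by_cases h : a = k <;> simp [hP, h]

lemma filterA (R C q r : Int) (k : Nat) (hC : 0 < C)
    (hq0 : 0 ≤ q) (hqR : q < R) (hr0 : 0 ≤ r) (hrC : r < C) (hk : (k : Int) = q*C + r) :
    (opsA R C).filter (fun p => p.1 == k)
    = (if 0 < r then [(k, (k:Int) - 1)] else []) ++
      (if r + 1 < C then [(k, (k:Int) + 1)] else []) ++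
      (if 0 < q then [(k, (k:Int) - C)] else []) ++
      (if q + 1 < R then [(k, (k:Int) + C)] else []) := by
  have hqC : 0 ≤ q * C := mul_nonneg hq0 hC.le
  rw [opsA, List.filter_flatMap]
  have hout : ∀ i ∈ PySem.List.pyRange 0 R 1,
      List.filter (fun p => p.1 == k)
        ((PySem.List.pyRange 0 C 1).flatMap (fun j => opsCellA R C i j))
      = if i = q then
          ((if 0 < r then [(k, (k:Int) - 1)] else []) ++
           (if r + 1 < C then [(k, (k:Int) + 1)] else []) ++
           (if 0 < q then [(k, (k:Int) - C)] else []) ++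
           (if q + 1 < R then [(k, (k:Int) + C)] else []))
        else [] := by
    intro i hi
    rw [PySem.List.mem_pyRange_one] at hi
    rw [List.filter_flatMap]
    by_cases hiq : i = q
    · rw [if_pos hiq]
      have hin : ∀ j ∈ PySem.List.pyRange 0 C 1,
          List.filter (fun p => p.1 == k) (opsCellA R C i j)
          = if j = r then
              ((if 0 < r then [(k, (k:Int) - 1)] else []) ++
               (if r + 1 < C then [(k, (k:Int) + 1)] else []) ++
               (if 0 < q then [(k, (k:Int) - C)] else []) ++
               (if q + 1 < R then [(k, (k:Int) + C)] else []))
            else [] := by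
        intro j hj
        rw [PySem.List.mem_pyRange_one] at hj
        simp only [opsCellA, List.filter_append, filter_ite_key]
        by_cases hjr : j = r
        · rw [if_pos hjr, hiq, hjr]
          have he : (q*C+r).toNat = k := by omega
          have e1 : q*C+r - 1 = (k:Int) - 1 := by omega
          have e2 : q*C+r + 1 = (k:Int) + 1 := by omega
          have e3 : q*C+r - C = (k:Int) - C := by omega
          have e4 : q*C+r + C = (k:Int) + C := by omega
          rw [he, e1, e2, e3, e4]
          simp
        · rw [if_neg hjr, hiq]
          have hne : ¬ ((q*C+j).toNat = k) := by omega
          simp [hne]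
      rw [List.flatMap_congr hin, flatMap_pyRange_one C r (by omega), if_pos ⟨hr0, hrC⟩]
    · rw [if_neg hiq]
      have hin : ∀ j ∈ PySem.List.pyRange 0 C 1,
          List.filter (fun p => p.1 == k) (opsCellA R C i j) = ([] : List (Nat × Int)) := by
        intro j hj
        rw [PySem.List.mem_pyRange_one] at hj
        have hne : ¬ ((i*C+j).toNat = k) := by
          have h1 : i*C + j ≠ q*C + r :=
            fun h => hiq ((cellIff C q r i j hC hr0 hrC hj.1 hj.2).mp h).1
          have h2 : 0 ≤ i*C := mul_nonneg hi.1 hC.le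
          omega
        simp [opsCellA, List.filter_append, filter_ite_key, hne]
      rw [List.flatMap_congr hin]
      simp
  rw [List.flatMap_congr hout, flatMap_pyRange_one R q (by omega), if_pos ⟨hq0, hqR⟩]

lemma filterH (R C q r : Int) (k : Nat) (hC : 0 < C)
    (hq0 : 0 ≤ q) (hqR : q < R) (hr0 : 0 ≤ r) (hrC : r < C) (hk : (k : Int) = q*C + r) :
    (opsH R C).filter (fun p => p.1 == k)
    = (if 0 < r then [(k, (k:Int) - 1)] else []) ++
      (if r + 1 < C then [(k, (k:Int) + 1)] else []) := by
  have hqC : 0 ≤ q * C := mul_nonneg hq0 hC.le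
  rw [opsH, List.filter_flatMap]
  have hout : ∀ i ∈ PySem.List.pyRange 0 R 1,
      List.filter (fun p => p.1 == k)
        ((PySem.List.pyRange 0 (C-1) 1).flatMap (fun j =>
          [((i*C+j).toNat, i*C+j + 1), ((i*C+j+1).toNat, i*C+j)]))
      = if i = q then
          ((if 0 < r then [(k, (k:Int) - 1)] else []) ++
           (if r + 1 < C then [(k, (k:Int) + 1)] else []))
        else [] := by
    intro i hi
    rw [PySem.List.mem_pyRange_one] at hi
    rw [List.filter_flatMap]
    by_cases hiq : i = q
    · rw [if_pos hiq]
      have hin : ∀ j ∈ PySem.List.pyRange 0 (C-1) 1,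
          List.filter (fun p => p.1 == k) [((i*C+j).toNat, i*C+j + 1), ((i*C+j+1).toNat, i*C+j)]
          = (if j = r - 1 then [(k, (k:Int) - 1)] else []) ++
            (if j = r then [(k, (k:Int) + 1)] else []) := by
        intro j hj
        rw [PySem.List.mem_pyRange_one] at hj
        rw [filter_pair_key, hiq]
        by_cases hjr : j = r
        · have h1 : (q*C+j).toNat = k := by omega
          have h2 : ¬ ((q*C+j+1).toNat = k) := by omega
          rw [if_pos h1, if_neg h2, if_neg (by omega : ¬ (j = r - 1)), if_pos hjr, h1,
              (by omega : q*C+j + 1 = (k:Int) + 1)]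
          simp
        · by_cases hjr1 : j = r - 1
          · have h1 : ¬ ((q*C+j).toNat = k) := by omega
            have h2 : (q*C+j+1).toNat = k := by omega
            rw [if_neg h1, if_pos h2, if_pos hjr1, if_neg hjr, h2,
                (by omega : q*C+j = (k:Int) - 1)]
            simp
          · have h1 : ¬ ((q*C+j).toNat = k) := by omega
            have h2 : ¬ ((q*C+j+1).toNat = k) := by omega
            rw [if_neg h1, if_neg h2, if_neg hjr1, if_neg hjr]
      rw [List.flatMap_congr hin,
          flatMap_pyRange_two (C-1) (r-1) r (by omega) (by omega)]
      simp only [show ((0:Int) ≤ r-1 ∧ r-1 < C-1) ↔ (0 < r) from by omega,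
                 show ((0:Int) ≤ r ∧ r < C-1) ↔ (r+1 < C) from by omega]
    · rw [if_neg hiq]
      have hin : ∀ j ∈ PySem.List.pyRange 0 (C-1) 1,
          List.filter (fun p => p.1 == k) [((i*C+j).toNat, i*C+j + 1), ((i*C+j+1).toNat, i*C+j)]
          = ([] : List (Nat × Int)) := by
        intro j hj
        rw [PySem.List.mem_pyRange_one] at hj
        have h2 : 0 ≤ i*C := mul_nonneg hi.1 hC.le
        have ha : i*C + j ≠ q*C + r :=
          fun h => hiq ((cellIff C q r i j hC hr0 hrC hj.1 (by omega)).mp h).1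
        have hb : i*C + (j+1) ≠ q*C + r :=
          fun h => hiq ((cellIff C q r i (j+1) hC hr0 hrC (by omega) (by omega)).mp h).1
        have h1 : ¬ ((i*C+j).toNat = k) := by omega
        have h2' : ¬ ((i*C+j+1).toNat = k) := by omega
        rw [filter_pair_key, if_neg h1, if_neg h2']
        simp
      rw [List.flatMap_congr hin]
      simp
  rw [List.flatMap_congr hout, flatMap_pyRange_one R q (by omega), if_pos ⟨hq0, hqR⟩]

lemma filterV (R C q r : Int) (k : Nat) (hC : 0 < C)
    (hq0 : 0 ≤ q) (hqR : q < R) (hr0 : 0 ≤ r) (hrC : r < C) (hk : (k : Int) = q*C + r) :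
    (opsV R C).filter (fun p => p.1 == k)
    = (if 0 < q then [(k, (k:Int) - C)] else []) ++
      (if q + 1 < R then [(k, (k:Int) + C)] else []) := by
  have hqC : 0 ≤ q * C := mul_nonneg hq0 hC.le
  have hring : (q-1)*C = q*C - C := by ring
  rw [opsV, List.filter_flatMap]
  have hout : ∀ i ∈ PySem.List.pyRange 0 (R-1) 1,
      List.filter (fun p => p.1 == k)
        ((PySem.List.pyRange 0 C 1).flatMap (fun j =>
          [((i*C+j).toNat, i*C+j + C), ((i*C+j+C).toNat, i*C+j)]))
      = (if i = q - 1 then [(k, (k:Int) - C)] else []) ++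
        (if i = q then [(k, (k:Int) + C)] else []) := by
    intro i hi
    rw [PySem.List.mem_pyRange_one] at hi
    rw [List.filter_flatMap]
    by_cases hiq : i = q
    · rw [if_neg (by omega : ¬ (i = q - 1)), if_pos hiq]
      have hin : ∀ j ∈ PySem.List.pyRange 0 C 1,
          List.filter (fun p => p.1 == k) [((i*C+j).toNat, i*C+j + C), ((i*C+j+C).toNat, i*C+j)]
          = if j = r then [(k, (k:Int) + C)] else [] := by
        intro j hj
        rw [PySem.List.mem_pyRange_one] at hj
        rw [filter_pair_key, hiq]
        by_cases hjr : j = r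
        · have h1 : (q*C+j).toNat = k := by omega
          have h2 : ¬ ((q*C+j+C).toNat = k) := by omega
          rw [if_pos h1, if_neg h2, if_pos hjr, h1, (by omega : q*C+j + C = (k:Int) + C)]
          simp
        · have h1 : ¬ ((q*C+j).toNat = k) := by omega
          have h2 : ¬ ((q*C+j+C).toNat = k) := by omega
          rw [if_neg h1, if_neg h2, if_neg hjr]
          simp
      rw [List.flatMap_congr hin, flatMap_pyRange_one C r (by omega), if_pos ⟨hr0, hrC⟩]
      simp
    · by_cases hiq1 : i = q - 1
      · rw [if_pos hiq1, if_neg hiq]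
        have hin : ∀ j ∈ PySem.List.pyRange 0 C 1,
            List.filter (fun p => p.1 == k) [((i*C+j).toNat, i*C+j + C), ((i*C+j+C).toNat, i*C+j)]
            = if j = r then [(k, (k:Int) - C)] else [] := by
          intro j hj
          rw [PySem.List.mem_pyRange_one] at hj
          rw [filter_pair_key, hiq1]
          have h3 : 0 ≤ (q-1)*C := mul_nonneg (by omega) hC.le
          by_cases hjr : j = r
          · have h1 : ¬ (((q-1)*C+j).toNat = k) := by omega
            have h2 : ((q-1)*C+j+C).toNat = k := by omega
            rw [if_neg h1, if_pos h2, if_pos hjr, h2, (by omega : (q-1)*C+j = (k:Int) - C)]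
            simp
          · have h1 : ¬ (((q-1)*C+j).toNat = k) := by omega
            have h2 : ¬ (((q-1)*C+j+C).toNat = k) := by omega
            rw [if_neg h1, if_neg h2, if_neg hjr]
            simp
        rw [List.flatMap_congr hin, flatMap_pyRange_one C r (by omega), if_pos ⟨hr0, hrC⟩]
        simp
      · rw [if_neg hiq1, if_neg hiq]
        have hin : ∀ j ∈ PySem.List.pyRange 0 C 1,
            List.filter (fun p => p.1 == k) [((i*C+j).toNat, i*C+j + C), ((i*C+j+C).toNat, i*C+j)]
            = ([] : List (Nat × Int)) := by
          intro j hj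
          rw [PySem.List.mem_pyRange_one] at hj
          have h2 : 0 ≤ i*C := mul_nonneg hi.1 hC.le
          have hring2 : (i+1)*C = i*C + C := by ring
          have ha : i*C + j ≠ q*C + r :=
            fun h => hiq ((cellIff C q r i j hC hr0 hrC hj.1 hj.2).mp h).1
          have hb : (i+1)*C + j ≠ q*C + r :=
            fun h => hiq1 (by have := ((cellIff C q r (i+1) j hC hr0 hrC hj.1 hj.2).mp h).1; omega)
          have h1 : ¬ ((i*C+j).toNat = k) := by omega
          have h2' : ¬ ((i*C+j+C).toNat = k) := by omega
          rw [filter_pair_key, if_neg h1, if_neg h2']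
          simp
        rw [List.flatMap_congr hin]
        simp
  rw [List.flatMap_congr hout,
      flatMap_pyRange_two (R-1) (q-1) q (by omega) (by omega)]
  simp only [show ((0:Int) ≤ q-1 ∧ q-1 < R-1) ↔ (0 < q) from by omega,
             show ((0:Int) ≤ q ∧ q < R-1) ↔ (q+1 < R) from by omega]

lemma main_eq (R C : Int) : generate_2d_grid R C = generate_2d_grid_alt R C := by
  rw [portA_eq, portB_eq]
  by_cases hR : 0 < R
  · by_cases hC : 0 < C
    · apply applyOps_ext
      intro k hk
      have hknn : (0:Int) ≤ R * C := by positivity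
      have hkK : (k : Int) < R * C := by
        rw [List.length_replicate] at hk; omega
      have hq0 : 0 ≤ (k:Int) / C := Int.ediv_nonneg (by omega) hC.le
      have hqR : (k:Int) / C < R := (Int.ediv_lt_iff_lt_mul hC).mpr (by linarith [mul_comm R C])
      have hr0 : 0 ≤ (k:Int) % C := Int.emod_nonneg _ (by omega)
      have hrC : (k:Int) % C < C := Int.emod_lt_of_pos _ hC
      have hkqr : (k:Int) = ((k:Int)/C) * C + (k:Int) % C := by
        have := Int.mul_ediv_add_emod (k:Int) C; linarith
      rw [List.filter_append,
          filterA R C ((k:Int)/C) ((k:Int)%C) k hC hq0 hqR hr0 hrC hkqr,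
          filterH R C ((k:Int)/C) ((k:Int)%C) k hC hq0 hqR hr0 hrC hkqr,
          filterV R C ((k:Int)/C) ((k:Int)%C) k hC hq0 hqR hr0 hrC hkqr]
      simp [List.append_assoc]
    · have h1 : opsA R C = [] := by
        simp [opsA, PySem.List.pyRange_one_eq_nil (show C ≤ 0 by omega)]
      have h2 : opsH R C = [] := by
        simp [opsH, PySem.List.pyRange_one_eq_nil (show C - 1 ≤ 0 by omega)]
      have h3 : opsV R C = [] := by
        simp [opsV, PySem.List.pyRange_one_eq_nil (show C ≤ 0 by omega)]
      rw [h1, h2, h3]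
      rfl
  · have h1 : opsA R C = [] := by
      simp [opsA, PySem.List.pyRange_one_eq_nil (show R ≤ 0 by omega)]
    have h2 : opsH R C = [] := by
      simp [opsH, PySem.List.pyRange_one_eq_nil (show R ≤ 0 by omega)]
    have h3 : opsV R C = [] := by
      simp [opsV, PySem.List.pyRange_one_eq_nil (show R - 1 ≤ 0 by omega)]
    rw [h1, h2, h3]
    rfl

-- ===== VERDICT (by name: the statement is the Claim_ definition above) =====
theorem generate_2d_grid_spec : Claim_equal_generate_2d_grid := by
  intro R C _
  show generate_2d_grid R C = generate_2d_grid_alt R C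
  exact main_eq R C
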